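-- pv_equiv track=rewrite | github.com/SJ-1011/BOJ | 백준/Silver/10773. 제로/제로.py | Solution
-- ===== SOURCE A (Python) =====
-- def Solution(data):
--   sum = 0
--   ans = []
--   for i in range(len(data)):
--     if data[i] != 0:
--       ans.append(data[i])
--     else:
--       ans.pop()
--
--   for i in range(len(ans)):
--     sum += ans[i]
--
--   return sum
-- ===== SOURCE B (Python) =====
-- def Solution(data):
--     # No stack at all: one right-to-left pass with a "skip" counter.
--     # A zero cancels the nearest preceding surviving nonzero, so scanning from
--     # the right, each zero increments skip and each nonzero is either consumed
--     # by a pending skip or added to the total (backspace-matching, O(1) space).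
--     total = 0
--     skip = 0
--     for v in reversed(data):
--         if v == 0:
--             skip += 1
--         elif skip:
--             skip -= 1
--         else:
--             total += v
--     return total
-- ===== Notes on version B (the rewrite author's own statement) =====
-- stated objective: alternative
-- what changed: Drops the stack entirely: a single right-to-left pass with a skip counter (backspace-matching) adds exactly the surviving values, O(1) extra space instead of A's stack plus second summation loop.
import Mathlib
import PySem

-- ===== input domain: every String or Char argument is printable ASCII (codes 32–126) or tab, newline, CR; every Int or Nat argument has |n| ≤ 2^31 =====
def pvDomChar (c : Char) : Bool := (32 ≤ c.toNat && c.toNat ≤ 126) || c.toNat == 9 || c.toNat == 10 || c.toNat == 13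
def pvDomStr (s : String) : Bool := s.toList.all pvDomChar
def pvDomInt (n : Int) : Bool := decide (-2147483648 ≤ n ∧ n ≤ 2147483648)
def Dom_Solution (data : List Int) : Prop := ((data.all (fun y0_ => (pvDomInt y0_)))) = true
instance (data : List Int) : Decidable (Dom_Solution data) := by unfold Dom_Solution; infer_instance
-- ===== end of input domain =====

-- B replaces A's stack + second summation loop by one right-to-left pass with a skip counter (backspace-matching); equal wherever A returns.


-- ===== PORT A =====
-- first loop: build the stack; ans.pop() on a nonempty list removes the last element = dropLast
-- (exact on Pre_; the empty-stack pop where Python raises IndexError is excluded by Pre_Solution)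
def Solution (data : List Int) : Int :=
  let ans := data.foldl (fun s v => if v ≠ 0 then s ++ [v] else s.dropLast) []
  -- second loop: sum += ans[i] over the surviving stack
  ans.foldl (fun s x => s + x) 0

-- ===== PORT B =====
-- one reverse pass, state = (total, skip); no stack
def Solution_alt (data : List Int) : Int :=
  (data.reverse.foldl
    (fun (st : Int × Int) v =>
      if v = 0 then (st.1, st.2 + 1)
      else if st.2 ≠ 0 then (st.1, st.2 - 1)
      else (st.1 + v, st.2))
    (0, 0)).1

-- ===== PRECONDITION & SPEC =====
-- Pre_ excludes exactly the inputs on which Python A raises IndexError: those where some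
-- prefix has more zeros than nonzeros (a zero then pops an empty stack).
def Pre_Solution (data : List Int) : Prop :=
  ∀ i, i ≤ data.length →
    (data.take i).countP (fun x => x = 0) ≤ (data.take i).countP (fun x => x ≠ 0)
instance (data : List Int) : Decidable (Pre_Solution data) := by unfold Pre_Solution; infer_instance
def pvWitness_Solution : List Int := [3, 1, 0, 5]

def Spec_Solution (data : List Int) (out : Int) : Prop := out = Solution_alt data
instance (data : List Int) (out : Int) : Decidable (Spec_Solution data out) := by unfold Spec_Solution; infer_instance

-- ===== CLAIM (what is proved, stated in full; the proofs are below) =====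
def Claim_equal_Solution : Prop := ∀ (data : List Int), Dom_Solution data → Pre_Solution data → Spec_Solution data (Solution data)

-- ===== LEMMAS AND PROOFS =====

-- spec helper for the proofs: survivors of a suffix, and its number of unmatched zeros
def pvF : List Int → List Int × Nat
  | [] => ([], 0)
  | v :: r =>
    let p := pvF r
    if v = 0 then (p.1, p.2 + 1)
    else if p.2 ≠ 0 then (p.1, p.2 - 1)
    else (v :: p.1, p.2)

lemma pvF_cons_zero (r : List Int) : pvF (0 :: r) = ((pvF r).1, (pvF r).2 + 1) := by
  simp [pvF]

lemma pvF_cons_nz {v : Int} (hv : v ≠ 0) (r : List Int) :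
    pvF (v :: r) = if (pvF r).2 ≠ 0 then ((pvF r).1, (pvF r).2 - 1)
                   else (v :: (pvF r).1, (pvF r).2) := by
  simp [pvF, hv]

lemma foldl_add_sum (l : List Int) : ∀ a : Int, l.foldl (fun s x => s + x) a = a + l.sum := by
  induction l with
  | nil => intro a; simp
  | cons v r ih => intro a; simp [ih, List.sum_cons]; ring

-- A's stack loop, started from stack s: the unmatched zeros of l pop the top of s,
-- the survivors of l are appended
lemma stack_lemma (l : List Int) : ∀ s : List Int, (pvF l).2 ≤ s.length →
    l.foldl (fun s v => if v ≠ 0 then s ++ [v] else s.dropLast) s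
      = s.take (s.length - (pvF l).2) ++ (pvF l).1 := by
  induction l with
  | nil => intro s _; simp [pvF]
  | cons v r ih =>
    intro s hk
    by_cases hv : v = 0
    · subst hv
      rw [pvF_cons_zero] at hk ⊢
      have hk' : (pvF r).2 ≤ s.dropLast.length := by
        simp [List.length_dropLast]; omega
      simp only [List.foldl_cons, if_neg (by simp : ¬ (0 : Int) ≠ 0)]
      rw [ih s.dropLast hk']
      congr 1
      rw [List.dropLast_eq_take, List.take_take]
      congr 1
      simp only [List.length_take]
      omega
    · rw [pvF_cons_nz hv] at hk ⊢
      simp only [List.foldl_cons, if_pos hv]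
      by_cases hz : (pvF r).2 ≠ 0
      · simp only [if_pos hz] at hk ⊢
        have hk' : (pvF r).2 ≤ (s ++ [v]).length := by simp; omega
        rw [ih (s ++ [v]) hk']
        have hle : (s ++ [v]).length - (pvF r).2 ≤ s.length := by simp; omega
        rw [List.take_append_of_le_length hle]
        congr 2
        simp; omega
      · simp only [if_neg hz] at hk ⊢
        have hz' : (pvF r).2 = 0 := by omega
        have hk' : (pvF r).2 ≤ (s ++ [v]).length := by simp; omega
        rw [ih (s ++ [v]) hk', hz']
        rw [Nat.sub_zero, List.take_of_length_le (by simp)]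
        simp

-- B's reverse pass computes the sum of the survivors and the count of unmatched zeros
lemma alt_foldr (l : List Int) :
    l.foldr
      (fun v (st : Int × Int) =>
        if v = 0 then (st.1, st.2 + 1)
        else if st.2 ≠ 0 then (st.1, st.2 - 1)
        else (st.1 + v, st.2))
      (0, 0)
    = ((pvF l).1.sum, ((pvF l).2 : Int)) := by
  induction l with
  | nil => simp [pvF]
  | cons v r ih =>
    simp only [List.foldr_cons, ih]
    by_cases hv : v = 0
    · subst hv; rw [pvF_cons_zero]; simp
    · rw [pvF_cons_nz hv]
      by_cases hz : (pvF r).2 ≠ 0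
      · have hz' : ((pvF r).2 : Int) ≠ 0 := by exact_mod_cast hz
        simp only [if_pos hz, if_neg hv, if_pos hz']
        have hge : 1 ≤ (pvF r).2 := by omega
        simp only [Prod.mk.injEq]
        exact ⟨trivial, by omega⟩
      · have hz0 : (pvF r).2 = 0 := by omega
        simp [hz0, hv, List.sum_cons]
        ring

-- under the prefix-count condition (shifted by a credit c) the unmatched-zero count is ≤ c
lemma pre_bound (l : List Int) : ∀ c : Int,
    (∀ i, i ≤ l.length →
      ((l.take i).countP (fun x => x = 0) : Int) ≤ c + (l.take i).countP (fun x => x ≠ 0)) →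
    ((pvF l).2 : Int) ≤ c := by
  induction l with
  | nil => intro c h; simpa [pvF] using h 0 (by simp)
  | cons v r ih =>
    intro c h
    by_cases hv : v = 0
    · subst hv
      have h1 : (1 : Int) ≤ c := by simpa using h 1 (by simp)
      have hr : ((pvF r).2 : Int) ≤ c - 1 := by
        apply ih
        intro i hi
        have := h (i + 1) (by simp; omega)
        simp at this ⊢
        omega
      rw [pvF_cons_zero]
      push_cast
      omega
    · have hr : ((pvF r).2 : Int) ≤ c + 1 := by
        apply ih
        intro i hi
        have := h (i + 1) (by simp; omega)
        simp [hv] at this ⊢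
        omega
      have h0 : (0 : Int) ≤ c := by simpa using h 0 (by simp)
      rw [pvF_cons_nz hv]
      by_cases hz : (pvF r).2 ≠ 0
      · simp only [if_pos hz]
        push_cast [show 1 ≤ (pvF r).2 by omega]
        omega
      · have hz0 : (pvF r).2 = 0 := by omega
        simp [hz0]
        omega

-- ===== VERDICT (by name: the statement is the Claim_ definition above) =====
theorem Solution_spec : Claim_equal_Solution := by
  intro data _ hpre
  show Solution data = Solution_alt data
  have hk : (pvF data).2 = 0 := by
    have := pre_bound data 0 (by
      intro i hi
      have := hpre i hi
      omega)
    omega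
  simp only [Solution, Solution_alt, List.foldl_reverse]
  have ha := stack_lemma data [] (by simp [hk])
  simp only [List.length_nil, hk, Nat.sub_zero, List.take_nil, List.nil_append] at ha
  rw [ha, foldl_add_sum, alt_foldr data]
  simp
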